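-- pv_equiv track=rewrite | github.com/eliottcassidy2000/math | 04-computation/beta2_rank_sum_constraint.py | all_tournaments
-- ===== SOURCE A (Python) =====
-- def all_tournaments(n):
--     edges = [(i,j) for i in range(n) for j in range(i+1,n)]
--     m = len(edges)
--     for mask in range(1 << m):
--         A = [[0]*n for _ in range(n)]
--         for idx, (i,j) in enumerate(edges):
--             if (mask >> idx) & 1:
--                 A[i][j] = 1
--             else:
--                 A[j][i] = 1
--         yield A
-- ===== SOURCE B (Python) =====
-- def all_tournaments(n):
--     edges = [(i, j) for i in range(n) for j in range(i + 1, n)]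
--
--     def go(k, A):
--         # recurse over edges from the highest index down; edge 0 varies fastest,
--         # and the 0-orientation (A[j][i]=1) is explored before the 1-orientation.
--         if k == 0:
--             yield [row[:] for row in A]
--             return
--         i, j = edges[k - 1]
--         B0 = [row[:] for row in A]
--         B0[j][i] = 1
--         yield from go(k - 1, B0)
--         B1 = [row[:] for row in A]
--         B1[i][j] = 1
--         yield from go(k - 1, B1)
--
--     yield from go(len(edges), [[0] * n for _ in range(n)])
-- ===== Notes on version B (the rewrite author's own statement) =====
-- stated objective: alternative
-- what changed: Replaces the bitmask counting loop (enumerate masks 0..2^m-1 and decode each bit) by a binary recursion over the edge list that branches on each edge's orientation (0-orientation first, highest edge outermost) and yields a matrix copy at each leaf.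
import Mathlib
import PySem

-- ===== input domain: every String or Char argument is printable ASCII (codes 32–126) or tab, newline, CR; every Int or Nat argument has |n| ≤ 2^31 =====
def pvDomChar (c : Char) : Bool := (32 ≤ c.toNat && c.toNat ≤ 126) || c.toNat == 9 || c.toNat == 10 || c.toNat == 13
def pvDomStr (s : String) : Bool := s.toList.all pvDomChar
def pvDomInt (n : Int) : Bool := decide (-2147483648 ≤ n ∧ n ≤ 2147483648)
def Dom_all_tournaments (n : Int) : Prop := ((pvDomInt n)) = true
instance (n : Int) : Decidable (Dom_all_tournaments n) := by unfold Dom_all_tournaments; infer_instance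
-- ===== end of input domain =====

-- B replaces A's bitmask-counting enumeration by a binary recursion over the edge list
-- (0-orientation first, highest edge outermost); same values in the same order.
-- A is a generator; both ports return the list of all yielded matrices.

-- ===== PORT A =====
-- Python `A[x][y] = 1` (indices always in range here): exact as List.set on the row.
def pvCellSet (A : List (List Int)) (x y : Nat) : List (List Int) :=
  A.set x ((A.getD x []).set y 1)

-- edges = [(i,j) for i in range(n) for j in range(i+1,n)]
def pvEdges (n : Int) : List (Int × Int) :=
  (PySem.List.pyRange 0 n 1).flatMap (fun i =>
    (PySem.List.pyRange (i + 1) n 1).map (fun j => (i, j)))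

-- A = [[0]*n for _ in range(n)]  ([] for n ≤ 0, matching replicate n.toNat)
def pvZeros (n : Int) : List (List Int) :=
  List.replicate n.toNat (List.replicate n.toNat 0)

-- body of A's inner loop: `if (mask >> idx) & 1: A[i][j]=1 else: A[j][i]=1`
-- (idx from enumerate is ≥ 0, so `.toNat` on the shift amount is exact)
def pvStep (mask : Int) (A : List (List Int)) (p : Int × (Int × Int)) : List (List Int) :=
  if PySem.Int.band (mask >>> p.1.toNat) 1 = 1 then pvCellSet A p.2.1.toNat p.2.2.toNat
  else pvCellSet A p.2.2.toNat p.2.1.toNat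

def all_tournaments (n : Int) : List (List (List Int)) :=
  let edges := pvEdges n
  let m := edges.length
  (PySem.List.pyRange 0 ((1 : Int) <<< m) 1).map (fun mask =>
    (PySem.List.enumerate edges).foldl (pvStep mask) (pvZeros n))

-- ===== PORT B =====
-- go(k, A): branch on edge k-1 (0-orientation A[j][i]=1 first), recurse; leaf yields A.
-- (Python's defensive row copies become ordinary persistent updates here.)
def pvGo (edges : List (Int × Int)) : Nat → List (List Int) → List (List (List Int))
  | 0, A => [A]
  | k + 1, A =>
    let e := edges.getD k (0, 0)
    pvGo edges k (pvCellSet A e.2.toNat e.1.toNat) ++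
      pvGo edges k (pvCellSet A e.1.toNat e.2.toNat)

def all_tournaments_alt (n : Int) : List (List (List Int)) :=
  let edges := pvEdges n
  pvGo edges edges.length (pvZeros n)

-- ===== PRECONDITION & SPEC =====
def Spec_all_tournaments (n : Int) (out : List (List (List Int))) : Prop := out = all_tournaments_alt n
instance (n : Int) (out : List (List (List Int))) : Decidable (Spec_all_tournaments n out) := by unfold Spec_all_tournaments; infer_instance

-- ===== CLAIM (what is proved, stated in full; the proofs are below) =====
def Claim_equal_all_tournaments : Prop := ∀ (n : Int), Dom_all_tournaments n → Spec_all_tournaments n (all_tournaments n)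

-- ===== LEMMAS AND PROOFS =====

-- pure (Nat-mask) model of A's per-mask matrix construction, built edge by edge
def pvNatStep (m k : Nat) (e : Int × Int) (A : List (List Int)) : List (List Int) :=
  if m / 2 ^ k % 2 = 1 then pvCellSet A e.1.toNat e.2.toNat else pvCellSet A e.2.toNat e.1.toNat

def pvApply (edges : List (Int × Int)) : Nat → List (List Int) → Nat → List (List Int)
  | 0, A, _ => A
  | k + 1, A, m => pvNatStep m k (edges.getD k (0, 0)) (pvApply edges k A m)

-- cell updates at distinct cells commute
theorem pvCellSet_comm (A : List (List Int)) (a b c d : Nat) (h : (a, b) ≠ (c, d)) :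
    pvCellSet (pvCellSet A a b) c d = pvCellSet (pvCellSet A c d) a b := by
  unfold pvCellSet
  by_cases hac : a = c
  · subst hac
    have hbd : b ≠ d := fun hb => h (by rw [hb])
    by_cases hl : a < A.length
    · have h1 : ∀ r : List Int, (A.set a r).getD a [] = r := fun r => by
        rw [List.getD_eq_getElem?_getD, List.getElem?_set_self hl]; rfl
      rw [h1, h1, List.set_set, List.set_set, List.set_comm _ _ hbd]
    · have hge : A.length ≤ a := Nat.le_of_not_lt hl
      simp [List.set_eq_of_length_le hge]
  · have h1 : ∀ r : List Int, (A.set a r).getD c [] = A.getD c [] := fun r => by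
      rw [List.getD_eq_getElem?_getD, List.getElem?_set_ne hac]
      rw [List.getD_eq_getElem?_getD]
    have h2 : ∀ r : List Int, (A.set c r).getD a [] = A.getD a [] := fun r => by
      rw [List.getD_eq_getElem?_getD, List.getElem?_set_ne (Ne.symm hac)]
      rw [List.getD_eq_getElem?_getD]
    rw [h1, h2, List.set_comm _ _ hac]

-- the cells of edge e are disjoint from cell (p,q)
def pvAway (e : Int × Int) (p q : Nat) : Prop :=
  (e.1.toNat, e.2.toNat) ≠ (p, q) ∧ (e.2.toNat, e.1.toNat) ≠ (p, q)

-- a pre-applied cell update commutes through the whole edge fold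
theorem pvApply_cellSet (edges : List (Int × Int)) (k : Nat) (m : Nat)
    (p q : Nat) (h : ∀ t, t < k → pvAway (edges.getD t (0, 0)) p q) :
    ∀ A, pvApply edges k (pvCellSet A p q) m = pvCellSet (pvApply edges k A m) p q := by
  induction k with
  | zero => intro A; rfl
  | succ k ih =>
    intro A
    have hk := h k (Nat.lt_succ_self k)
    have ih' := ih (fun t ht => h t (Nat.lt_succ_of_lt ht))
    simp only [pvApply]
    rw [ih' A]
    unfold pvNatStep
    split
    · exact pvCellSet_comm _ _ _ _ _ (Ne.symm hk.1)
    · exact pvCellSet_comm _ _ _ _ _ (Ne.symm hk.2)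

-- adding 2^k does not change bits below k
theorem pv_bit_low {t k m : Nat} (ht : t < k) : (2 ^ k + m) / 2 ^ t % 2 = m / 2 ^ t % 2 := by
  have h1 : 2 ^ k = 2 ^ (k - t) * 2 ^ t := by
    rw [← pow_add]; congr 1; omega
  rw [Nat.add_comm, h1, Nat.add_mul_div_right _ _ (Nat.pow_pos (by norm_num))]
  have h2 : 2 ^ (k - t) = 2 * 2 ^ (k - t - 1) := by
    rw [← pow_succ']; congr 1; omega
  rw [h2]
  generalize m / 2 ^ t = x
  omega

theorem pvApply_highbit (edges : List (Int × Int)) {K : Nat} : ∀ {k : Nat}, k ≤ K → ∀ {m : Nat}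
    (A : List (List Int)), pvApply edges k A (2 ^ K + m) = pvApply edges k A m := by
  intro k
  induction k with
  | zero => intro _ _ _; rfl
  | succ k ih =>
    intro hk m A
    show pvNatStep _ k _ _ = pvNatStep _ k _ _
    rw [ih (by omega)]
    unfold pvNatStep
    rw [pv_bit_low (by omega)]

theorem pvEdges_ord (n : Int) : ∀ e ∈ pvEdges n, 0 ≤ e.1 ∧ e.1 < e.2 := by
  intro e he
  simp only [pvEdges, List.mem_flatMap, List.mem_map, PySem.List.mem_pyRange_one] at he
  obtain ⟨i, ⟨hi0, hin⟩, j, ⟨hj1, hjn⟩, rfl⟩ := he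
  exact ⟨hi0, by omega⟩

theorem pvEdges_nodup (n : Int) : (pvEdges n).Nodup := by
  unfold pvEdges
  rw [List.nodup_flatMap]
  constructor
  · intro i _
    exact (PySem.List.nodup_pyRange_one _ _).map (fun a b h => by
      simpa using congrArg Prod.snd h)
  · have hnd := PySem.List.nodup_pyRange_one 0 n
    refine hnd.imp ?_
    intro i i' hne e he he'
    simp only [List.mem_map] at he he'
    obtain ⟨j, _, rfl⟩ := he
    obtain ⟨j', _, h2⟩ := he'
    exact hne (by simpa using congrArg Prod.fst h2.symm)

-- cells of distinct ordered edges are distinct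
theorem pvAway_of_ne {e f : Int × Int} (he : 0 ≤ e.1 ∧ e.1 < e.2) (hf : 0 ≤ f.1 ∧ f.1 < f.2)
    (hne : e ≠ f) : pvAway e f.1.toNat f.2.toNat ∧ pvAway e f.2.toNat f.1.toNat := by
  obtain ⟨e1, e2⟩ := e
  obtain ⟨f1, f2⟩ := f
  simp only [pvAway, ne_eq, Prod.mk.injEq, not_and] at *
  constructor <;> constructor <;> intro h1 h2 <;> omega

-- main correspondence: pvGo enumerates exactly the masks 0..2^k-1 in A's order
theorem pvGo_eq (edges : List (Int × Int))
    (hord : ∀ e ∈ edges, 0 ≤ e.1 ∧ e.1 < e.2) (hnd : edges.Nodup) :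
    ∀ k, k ≤ edges.length → ∀ A,
      pvGo edges k A = (List.range (2 ^ k)).map (pvApply edges k A) := by
  intro k
  induction k with
  | zero => intro _ A; rfl
  | succ k ih =>
    intro hk A
    have hkl : k < edges.length := by omega
    have hget : edges.getD k (0, 0) = edges[k] := List.getD_eq_getElem _ _ hkl
    have haway : ∀ t, t < k →
        pvAway (edges.getD t (0, 0)) (edges[k].1.toNat) (edges[k].2.toNat) ∧
        pvAway (edges.getD t (0, 0)) (edges[k].2.toNat) (edges[k].1.toNat) := by
      intro t ht
      have htl : t < edges.length := by omega
      have hgt : edges.getD t (0, 0) = edges[t] := List.getD_eq_getElem _ _ htl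
      rw [hgt]
      have hne : edges[t] ≠ edges[k] :=
        (List.pairwise_iff_getElem.mp hnd) t k htl hkl ht
      exact pvAway_of_ne (hord _ (List.getElem_mem htl)) (hord _ (List.getElem_mem hkl)) hne
    have h2 : 2 ^ (k + 1) = 2 ^ k + 2 ^ k := by rw [pow_succ]; omega
    rw [h2, List.range_add, List.map_append, List.map_map]
    show pvGo edges k (pvCellSet A _ _) ++ pvGo edges k (pvCellSet A _ _) = _
    rw [hget, ih (by omega), ih (by omega)]
    congr 1
    · apply List.map_congr_left
      intro m hm
      have hm' : m < 2 ^ k := List.mem_range.mp hm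
      rw [pvApply_cellSet edges k m _ _ (fun t ht => (haway t ht).2)]
      simp only [pvApply, pvNatStep]
      rw [Nat.div_eq_of_lt hm']
      simp [List.getElem?_eq_getElem hkl]
    · apply List.map_congr_left
      intro m hm
      have hm' : m < 2 ^ k := List.mem_range.mp hm
      rw [pvApply_cellSet edges k m _ _ (fun t ht => (haway t ht).1)]
      simp only [Function.comp, pvApply, pvNatStep]
      rw [pvApply_highbit edges (Nat.le_refl k)]
      have hbit : (2 ^ k + m) / 2 ^ k % 2 = 1 := by
        rw [Nat.add_comm, Nat.add_div_right _ (Nat.pow_pos (by norm_num)),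
            Nat.div_eq_of_lt hm']
      rw [hbit]
      simp [List.getElem?_eq_getElem hkl]

theorem pvEnumAppend (xs ys : List (Int × Int)) (s : Int) :
    PySem.List.enumerate (xs ++ ys) s =
      PySem.List.enumerate xs s ++ PySem.List.enumerate ys (s + xs.length) := by
  induction xs generalizing s with
  | nil => simp [PySem.List.enumerate_nil]
  | cons x xs ih =>
    simp only [List.cons_append, PySem.List.enumerate_cons, ih, List.length_cons]
    push_cast
    have : s + 1 + (xs.length : Int) = s + ((xs.length : Int) + 1) := by ring
    rw [this]

-- A's branch on (mask >> idx) & 1 is the Nat-mask bit test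
theorem pvStep_natStep (m k : Nat) (e : Int × Int) (A : List (List Int)) :
    pvStep (m : Int) A ((k : Int), e) = pvNatStep m k e A := by
  unfold pvStep pvNatStep
  have h1 : ((m : Int) >>> ((k : Int)).toNat) = ((m >>> k : Nat) : Int) := by
    rw [Int.toNat_natCast, Int.natCast_shiftRight]
  rw [h1]
  have h2 : PySem.Int.band ((m >>> k : Nat) : Int) 1 = (((m >>> k) &&& 1 : Nat) : Int) := by
    exact_mod_cast PySem.Int.band_natCast (m >>> k) 1
  rw [h2]
  have h3 : (((m >>> k) &&& 1 : Nat) : Int) = 1 ↔ m / 2 ^ k % 2 = 1 := by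
    rw [Nat.and_one_is_mod, Nat.shiftRight_eq_div_pow]
    exact_mod_cast Iff.rfl
  simp only [h3]

-- A's foldl over the enumerated edge list computes pvApply
theorem pvFoldA (edges : List (Int × Int)) (m : Nat) :
    ∀ k, k ≤ edges.length → ∀ A,
      (PySem.List.enumerate (edges.take k)).foldl (pvStep (m : Int)) A = pvApply edges k A m := by
  intro k
  induction k with
  | zero => intro _ A; rfl
  | succ k ih =>
    intro hk A
    have hkl : k < edges.length := by omega
    rw [List.take_add_one, List.getElem?_eq_getElem hkl]
    show (PySem.List.enumerate (edges.take k ++ [edges[k]]) 0).foldl _ _ = _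
    rw [pvEnumAppend, List.foldl_append, ih (by omega)]
    have hlen : (edges.take k).length = k := by simp; omega
    simp only [hlen, PySem.List.enumerate_cons, PySem.List.enumerate_nil, List.foldl_cons,
      List.foldl_nil, zero_add]
    show pvStep _ _ ((k : Int), edges[k]) = pvApply edges (k + 1) A m
    rw [pvStep_natStep]
    simp [pvApply, List.getD_eq_getElem?_getD, List.getElem?_eq_getElem hkl]

theorem pvMain (n : Int) : all_tournaments n = all_tournaments_alt n := by
  show (PySem.List.pyRange 0 ((1 : Int) <<< (pvEdges n).length) 1).map (fun mask =>
      (PySem.List.enumerate (pvEdges n)).foldl (pvStep mask) (pvZeros n)) =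
    pvGo (pvEdges n) (pvEdges n).length (pvZeros n)
  have hsh : ((1 : Int) <<< (pvEdges n).length) = ((2 ^ (pvEdges n).length : Nat) : Int) := by
    rw [Int.shiftLeft_eq, one_mul]; norm_cast
  rw [hsh, PySem.List.pyRange_one]
  have ht : (((2 ^ (pvEdges n).length : Nat) : Int) - 0).toNat = 2 ^ (pvEdges n).length := by
    simp only [Int.sub_zero, Int.toNat_natCast]
  rw [ht, List.map_map]
  rw [pvGo_eq (pvEdges n) (pvEdges_ord n) (pvEdges_nodup n) _ (Nat.le_refl _)]
  apply List.map_congr_left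
  intro m _
  show (PySem.List.enumerate (pvEdges n)).foldl (pvStep (0 + (m : Int))) (pvZeros n) = _
  rw [zero_add, ← List.take_length (l := pvEdges n)]
  rw [pvFoldA (pvEdges n) m _ (by simp) (pvZeros n)]
  simp

-- ===== VERDICT (by name: the statement is the Claim_ definition above) =====
theorem all_tournaments_spec : Claim_equal_all_tournaments := by
  intro n _
  exact pvMain n
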